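-- pv_equiv track=rewrite | github.com/nattigy/competitive_programming | Edu div 2 contest/B. Absent Remainder.py | absentRemainder
-- ===== SOURCE A (Python) =====
-- import heapq
--
-- def absentRemainder(n, nums):
--     min_heap = nums[:]
--     heapq.heapify(min_heap)
--     max_heap = [-1*i for i in nums]
--     heapq.heapify(max_heap)
--     i = 0
--     ans = []
--     while i < n//2:
--         maxx = heapq.heappop(max_heap)*-1
--         minn = heapq.heappop(min_heap)
--         if maxx != minn:
--             ans.append([maxx, minn])
--         i += 1
--     return ans
-- ===== SOURCE B (Python) =====
-- def absentRemainder(n, nums):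
--     s = sorted(nums)
--     m = len(nums)
--     ans = []
--     for i in range(n // 2):
--         mx = s[m - 1 - i]
--         mn = s[i]
--         if mx != mn:
--             ans.append([mx, mn])
--     return ans
-- ===== Notes on version B (the rewrite author's own statement) =====
-- stated objective: simpler
-- what changed: Replaces the two binary heaps (heapify plus n//2 heappops from each) with a single sort and a symmetric two-ended index scan pairing s[m-1-i] with s[i].
import Mathlib
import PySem

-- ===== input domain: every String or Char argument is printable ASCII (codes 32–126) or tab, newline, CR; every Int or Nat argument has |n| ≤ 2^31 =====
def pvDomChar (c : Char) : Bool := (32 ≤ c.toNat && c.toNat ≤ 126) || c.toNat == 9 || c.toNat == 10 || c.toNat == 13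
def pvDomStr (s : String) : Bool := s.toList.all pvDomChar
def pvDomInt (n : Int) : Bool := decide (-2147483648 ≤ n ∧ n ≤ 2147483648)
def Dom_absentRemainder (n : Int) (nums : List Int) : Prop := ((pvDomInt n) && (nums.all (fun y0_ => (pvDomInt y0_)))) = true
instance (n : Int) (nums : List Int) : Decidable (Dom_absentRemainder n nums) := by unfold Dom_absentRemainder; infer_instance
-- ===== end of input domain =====

-- B replaces A's two binary heaps by one sort and a symmetric two-ended index scan (objective: simpler).

-- ===== PORT A =====
-- heapq.heappop on a list of ints returns the minimum value and removes one occurrence of it;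
-- since ints are compared by value, modelling the heap as the list of its elements and heappop as
-- "first minimal element + remove that occurrence" is exact for every value A ever returns.
def aPop (l : List Int) : Option (Int × List Int) :=
  match PySem.List.min? l (fun x => x) with
  | some m =>
    match PySem.List.remove? l m with
    | some r => some (m, r)
    | none => none
  | none => none   -- IndexError: heap empty

-- the 'while i < n//2' loop of A, counting down the remaining iterations
def aLoop : Nat → List Int → List Int → List (List Int) → List (List Int)
  | 0, _, _, ans => ans
  | k+1, maxh, minh, ans =>
    match aPop maxh, aPop minh with
    | some (mp, maxh'), some (minn, minh') =>
        let maxx := mp * (-1)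
        aLoop k maxh' minh' (if maxx ≠ minn then ans ++ [[maxx, minn]] else ans)
    | _, _ => ans   -- IndexError (pop from empty heap): excluded by Pre_

def absentRemainder (n : Int) (nums : List Int) : List (List Int) :=
  let min_heap := nums
  let max_heap := nums.map (fun i => -1 * i)
  aLoop (PySem.Int.floordiv n 2).toNat max_heap min_heap []

-- ===== PORT B =====
def absentRemainder_alt (n : Int) (nums : List Int) : List (List Int) :=
  let s := PySem.List.sorted nums (fun x => x) false
  let m : Int := (nums.length : Int)
  (PySem.List.pyRange 0 (PySem.Int.floordiv n 2) 1).foldl (fun ans i =>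
    match PySem.List.pyGet? s (m - 1 - i), PySem.List.pyGet? s i with
    | some mx, some mn => if mx ≠ mn then ans ++ [[mx, mn]] else ans
    | _, _ => ans) []   -- IndexError branch: never reached under Pre_

-- ===== PRECONDITION & SPEC =====
-- A raises IndexError (heappop from an exhausted heap) exactly when n//2 > len(nums); Pre_ excludes only that.
def Pre_absentRemainder (n : Int) (nums : List Int) : Prop :=
  PySem.Int.floordiv n 2 ≤ (nums.length : Int)
instance (n : Int) (nums : List Int) : Decidable (Pre_absentRemainder n nums) := by
  unfold Pre_absentRemainder; infer_instance
def pvWitness_absentRemainder : Int × List Int := (5, [3, 1, 4, 1, 5])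

def Spec_absentRemainder (n : Int) (nums : List Int) (out : List (List Int)) : Prop := out = absentRemainder_alt n nums
instance (n : Int) (nums : List Int) (out : List (List Int)) : Decidable (Spec_absentRemainder n nums out) := by unfold Spec_absentRemainder; infer_instance

-- ===== CLAIM (what is proved, stated in full; the proofs are below) =====
def Claim_equal_absentRemainder : Prop := ∀ (n : Int) (nums : List Int), Dom_absentRemainder n nums → Pre_absentRemainder n nums → Spec_absentRemainder n nums (absentRemainder n nums)

-- ===== LEMMAS AND PROOFS =====

-- reference loop consuming the heads of the two sorted views; both ports are reduced to it
def gLoop : Nat → List Int → List Int → List (List Int) → List (List Int)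
  | 0, _, _, ans => ans
  | k+1, a :: as, b :: bs, ans => gLoop k as bs (if a * (-1) ≠ b then ans ++ [[a * (-1), b]] else ans)
  | _+1, _, _, ans => ans

-- popping returns the head of the sorted view, leaving a list whose sorted view is the tail
theorem aPop_sorted {xs : List Int} {a : Int} {rest : List Int}
    (h : PySem.List.sorted xs (fun x => x) false = a :: rest) :
    ∃ t, aPop xs = some (a, t) ∧ PySem.List.sorted t (fun x => x) false = rest ∧
      t.length + 1 = xs.length := by
  have hperm : (a :: rest).Perm xs := h ▸ PySem.List.sorted_perm xs (fun x => x) false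
  have hax : a ∈ xs := hperm.mem_iff.mp (List.mem_cons_self)
  have hne : xs ≠ [] := by
    intro hnil; rw [hnil] at h; simp [PySem.List.sorted] at h
  obtain ⟨m0, hm0⟩ : ∃ m0, PySem.List.min? xs (fun x => x) = some m0 := by
    cases hmin : PySem.List.min? xs (fun x => x) with
    | none => exact absurd ((PySem.List.min?_eq_none_iff xs (fun x => x)).mp hmin) hne
    | some m0 => exact ⟨m0, rfl⟩
  have hm0mem : m0 ∈ xs := PySem.List.min?_mem hm0
  have hm0min : ∀ y ∈ xs, m0 ≤ y := PySem.List.min?_isMin hm0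
  have hamin : ∀ y ∈ xs, a ≤ y := PySem.List.key_head_sorted_le xs (fun x => x) h
  have heq : m0 = a := le_antisymm (hm0min a hax) (hamin m0 hm0mem)
  subst heq
  have hrem : PySem.List.remove? xs m0 = some (xs.erase m0) :=
    PySem.List.remove?_eq_some_erase xs m0 hm0mem
  refine ⟨xs.erase m0, ?_, ?_, List.length_erase_add_one hm0mem⟩
  · simp [aPop, hm0, hrem]
  · apply PySem.List.sorted_id_eq_of_perm_of_pairwise
    · have := (hperm.erase m0)
      simpa using this
    · have hp := PySem.List.sorted_pairwise xs (fun x => x)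
      rw [h] at hp
      exact (List.pairwise_cons.mp hp).2

theorem aLoop_eq_gLoop : ∀ (k : Nat) (maxh minh : List Int) (ans : List (List Int)),
    k ≤ maxh.length → k ≤ minh.length →
    aLoop k maxh minh ans
      = gLoop k (PySem.List.sorted maxh (fun x => x) false)
               (PySem.List.sorted minh (fun x => x) false) ans := by
  intro k
  induction k with
  | zero => intro maxh minh ans _ _; rfl
  | succ k ih =>
    intro maxh minh ans h1 h2
    obtain ⟨a, as, ha⟩ : ∃ a as, PySem.List.sorted maxh (fun x => x) false = a :: as := by
      cases hc : PySem.List.sorted maxh (fun x => x) false with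
      | nil =>
        have hmn := (PySem.List.sorted_eq_nil_iff maxh (fun x => x) false).mp hc
        rw [hmn] at h1; simp at h1
      | cons a as => exact ⟨a, as, rfl⟩
    obtain ⟨b, bs, hb⟩ : ∃ b bs, PySem.List.sorted minh (fun x => x) false = b :: bs := by
      cases hc : PySem.List.sorted minh (fun x => x) false with
      | nil =>
        have hmn := (PySem.List.sorted_eq_nil_iff minh (fun x => x) false).mp hc
        rw [hmn] at h2; simp at h2
      | cons b bs => exact ⟨b, bs, rfl⟩
    obtain ⟨t1, hp1, hs1, hl1⟩ := aPop_sorted ha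
    obtain ⟨t2, hp2, hs2, hl2⟩ := aPop_sorted hb
    rw [ha, hb]
    show (match aPop maxh, aPop minh with
      | some (mp, maxh'), some (minn, minh') =>
          aLoop k maxh' minh' (if mp * (-1) ≠ minn then ans ++ [[mp * (-1), minn]] else ans)
      | _, _ => ans)
      = gLoop k as bs (if a * (-1) ≠ b then ans ++ [[a * (-1), b]] else ans)
    rw [hp1, hp2]
    simp only []
    rw [ih t1 t2 _ (by omega) (by omega), hs1, hs2]

-- sorted of the negated list is the reversed negation of the sorted list
theorem sorted_neg (nums : List Int) :
    PySem.List.sorted (nums.map (fun i => -1 * i)) (fun x => x) false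
      = ((PySem.List.sorted nums (fun x => x) false).map (fun x => -1 * x)).reverse := by
  apply PySem.List.sorted_id_eq_of_perm_of_pairwise
  · exact (List.reverse_perm _).trans ((PySem.List.sorted_perm nums (fun x => x) false).map _)
  · rw [List.pairwise_reverse]
    refine List.Pairwise.map _ ?_ (PySem.List.sorted_pairwise nums (fun x => x))
    intro a b hab
    omega

theorem gLoop_idx : ∀ (k : Nat) (a b : List Int) (ans : List (List Int)),
    k ≤ a.length → k ≤ b.length →
    gLoop k a b ans = (List.range k).foldl (fun ans i =>
      if a[i]! * (-1 : Int) ≠ b[i]! then ans ++ [[a[i]! * (-1 : Int), b[i]!]] else ans) ans := by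
  intro k
  induction k with
  | zero => intro a b ans _ _; rfl
  | succ k ih =>
    intro a b ans h1 h2
    cases a with
    | nil => simp at h1
    | cons x as =>
      cases b with
      | nil => simp at h2
      | cons y bs =>
        rw [List.range_succ_eq_map, List.foldl_cons, List.foldl_map]
        simp only [List.getElem!_eq_getElem?_getD, List.getElem?_cons_succ,
          List.getElem?_cons_zero, Option.getD_some]
        show gLoop k as bs _ = _
        rw [ih as bs _ (by simpa using h1) (by simpa using h2)]
        simp only [List.getElem!_eq_getElem?_getD]

-- one step of B's indexed fold equals one step of the indexed reference fold
theorem step_eq (s : List Int) (i : Nat) (hi : i < s.length) (acc : List (List Int)) :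
    (match PySem.List.pyGet? s ((s.length : Int) - 1 - (0 + (i : Int))), PySem.List.pyGet? s (0 + (i : Int)) with
     | some mx, some mn => if mx ≠ mn then acc ++ [[mx, mn]] else acc
     | _, _ => acc)
    = (if ((s.map (fun x => -1 * x)).reverse)[i]! * (-1 : Int) ≠ s[i]! then
        acc ++ [[((s.map (fun x => -1 * x)).reverse)[i]! * (-1 : Int), s[i]!]] else acc) := by
  have h1 : (s.length : Int) - 1 - (0 + (i : Int)) = ((s.length - 1 - i : Nat) : Int) := by omega
  have h2 : (0 + (i : Int)) = ((i : Nat) : Int) := by omega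
  have hj : s.length - 1 - i < s.length := by omega
  have hrev : ((s.map (fun x => -1 * x)).reverse)[i]! = -1 * s[s.length - 1 - i] := by
    rw [getElem!_pos ((s.map (fun x => -1 * x)).reverse) i (by simpa using hi)]
    rw [List.getElem_reverse]
    simp
  rw [h1, h2, PySem.List.pyGet?_natCast, PySem.List.pyGet?_natCast,
    List.getElem?_eq_getElem hj, List.getElem?_eq_getElem hi, hrev,
    getElem!_pos s i hi]
  have hmx : -1 * s[s.length - 1 - i] * (-1 : Int) = s[s.length - 1 - i] := by ring
  rw [hmx]

theorem main_eq (n : Int) (nums : List Int)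
    (hpre : PySem.Int.floordiv n 2 ≤ (nums.length : Int)) :
    absentRemainder n nums = absentRemainder_alt n nums := by
  set c := PySem.Int.floordiv n 2 with hc
  set s := PySem.List.sorted nums (fun x => x) false with hs
  have hsl : s.length = nums.length := PySem.List.length_sorted nums (fun x => x) false
  have hk : c.toNat ≤ nums.length := Int.toNat_le.mpr hpre
  show aLoop c.toNat (nums.map (fun i => -1 * i)) nums [] = _
  rw [aLoop_eq_gLoop c.toNat _ _ [] (by simpa using hk) hk, sorted_neg, ← hs,
    gLoop_idx c.toNat _ s [] (by simpa [hsl] using hk) (by omega)]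
  show _ = (PySem.List.pyRange 0 c 1).foldl _ []
  by_cases hcn : 0 ≤ c
  · have hck : ((c.toNat : Nat) : Int) = c := Int.toNat_of_nonneg hcn
    rw [← hck, PySem.List.pyRange_one, List.foldl_map]
    have hlen : ((c.toNat : Int) - 0).toNat = c.toNat := by omega
    rw [hlen]
    refine (PySem.List.foldl_congr_mem _ _ _ _ ?_).symm
    intro acc i hi
    have hik : i < c.toNat := List.mem_range.mp hi
    have hi' : i < s.length := by omega
    have := step_eq s i hi' acc
    rw [hsl] at this
    simpa using this
  · have hc0 : c.toNat = 0 := by omega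
    rw [hc0, PySem.List.pyRange_one_eq_nil (by omega)]
    rfl

-- ===== VERDICT (by name: the statement is the Claim_ definition above) =====
theorem absentRemainder_spec : Claim_equal_absentRemainder := by
  intro n nums _ hpre
  unfold Spec_absentRemainder
  exact main_eq n nums hpre
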